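-- pv_equiv track=rewrite | github.com/TenmonAI/tenmon-ark | api/automation/storage_backup_nas_observer_v1.py | _is_mounted
-- ===== SOURCE A (Python) =====
-- from typing import Any, Dict, List, Set, Tuple
--
-- def _is_mounted(path: str, active_mounts: Set[str]) -> bool:
--     q = path.rstrip("/") or "/"
--     if q in active_mounts:
--         return True
--     for mp in active_mounts:
--         m = mp.rstrip("/") or "/"
--         if q.startswith(m + "/"):
--             return True
--     return False
-- ===== SOURCE B (Python) =====
-- def _is_mounted(path: str, active_mounts) -> bool:
--     q = path.rstrip("/") or "/"
--     ancestors = {q[:i] for i, ch in enumerate(q) if ch == "/"}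
--     return any(mp == q or (mp.rstrip("/") or "/") in ancestors
--                for mp in active_mounts)
-- ===== Notes on version B (the rewrite author's own statement) =====
-- stated objective: alternative
-- what changed: B inverts the lookup direction: instead of testing q.startswith(m + '/') per mount, it builds the set of q's ancestor prefixes once and makes a single pass over the mounts checking exact-match-or-ancestor-set membership, so no startswith scan and no separate raw-membership pass remain.
import Mathlib
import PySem

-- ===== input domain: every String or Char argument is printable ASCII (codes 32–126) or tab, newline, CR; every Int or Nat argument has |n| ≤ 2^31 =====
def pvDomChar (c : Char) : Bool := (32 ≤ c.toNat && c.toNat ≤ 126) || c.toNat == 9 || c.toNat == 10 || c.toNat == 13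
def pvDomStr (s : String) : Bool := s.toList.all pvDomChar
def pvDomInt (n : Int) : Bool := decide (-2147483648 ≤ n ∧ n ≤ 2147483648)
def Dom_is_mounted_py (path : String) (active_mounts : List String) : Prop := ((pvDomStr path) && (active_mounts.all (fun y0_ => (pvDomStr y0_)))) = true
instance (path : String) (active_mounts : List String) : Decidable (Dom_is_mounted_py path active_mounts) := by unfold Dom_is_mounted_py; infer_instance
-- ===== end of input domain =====

-- B inverts A's lookup direction: it builds the set of the path's ancestor prefixes once and
-- makes a single pass over the mounts (exact match or ancestor-set membership); no startswith
-- scan and no separate raw-membership pass (objective: alternative decomposition).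

-- ===== PORT A =====
-- A-side helper: s.rstrip("/") on List Char (exact: drops trailing '/' characters)
def pvRstripSlash (cs : List Char) : List Char := (cs.reverse.dropWhile (fun c => c == '/')).reverse

-- A-side helper: `x or "/"` for the empty-string case (exact: '' is the only falsy str)
def pvOrSlash (cs : List Char) : List Char := if cs = [] then ['/'] else cs

def is_mounted_py (path : String) (active_mounts : List String) : Bool :=
  let q := pvOrSlash (pvRstripSlash path.toList)
  if active_mounts.any (fun mp => mp.toList == q) then true
  else
    -- for mp in active_mounts: m = mp.rstrip("/") or "/"; if q.startswith(m + "/"): return True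
    active_mounts.any (fun mp =>
      PySem.Chars.startswith q (pvOrSlash (pvRstripSlash mp.toList) ++ ['/']))

-- ===== PORT B =====
-- B-side helper: `cs.rstrip("/") or "/"` in one step (exact on the same grounds as A's helpers)
def pvNormB (cs : List Char) : List Char :=
  let r := cs.reverse.dropWhile (fun c => c == '/')
  if r = [] then ['/'] else r.reverse

def is_mounted_py_alt (path : String) (active_mounts : List String) : Bool :=
  let q := pvNormB path.toList
  -- ancestors = {q[:i] for i, ch in enumerate(q) if ch == "/"}
  let ancestors : PySem.Set (List Char) :=
    PySem.Set.ofList ((q.zipIdx.filter (fun p => p.1 == '/')).map (fun p => q.take p.2))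
  -- any(mp == q or (mp.rstrip("/") or "/") in ancestors for mp in active_mounts)
  active_mounts.any (fun mp =>
    mp.toList == q || PySem.Set.contains ancestors (pvNormB mp.toList))

-- ===== PRECONDITION & SPEC =====
def Spec_is_mounted_py (path : String) (active_mounts : List String) (out : Bool) : Prop := out = is_mounted_py_alt path active_mounts
instance (path : String) (active_mounts : List String) (out : Bool) : Decidable (Spec_is_mounted_py path active_mounts out) := by unfold Spec_is_mounted_py; infer_instance

-- ===== CLAIM (what is proved, stated in full; the proofs are below) =====
def Claim_equal_is_mounted_py : Prop := ∀ (path : String) (active_mounts : List String), Dom_is_mounted_py path active_mounts → Spec_is_mounted_py path active_mounts (is_mounted_py path active_mounts)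

-- ===== LEMMAS AND PROOFS =====

theorem pvNormB_eq (cs : List Char) : pvNormB cs = pvOrSlash (pvRstripSlash cs) := by
  unfold pvNormB pvOrSlash pvRstripSlash
  by_cases h : cs.reverse.dropWhile (fun c => c == '/') = [] <;> simp [h]

-- a snoc'd list is a prefix of q iff some position i of q carries its last element with q.take i the rest
theorem pv_prefix_snoc_iff (m : List Char) (c : Char) (q : List Char) :
    m ++ [c] <+: q ↔ ∃ i : Nat, ∃ h : i < q.length, q.take i = m ∧ q[i] = c := by
  constructor
  · rintro ⟨t, ht⟩
    subst ht
    refine ⟨m.length, by simp, ?_, ?_⟩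
    · rw [List.append_assoc]
      exact List.take_left' rfl
    · rw [List.getElem_append_left (by simp)]
      simp
  · rintro ⟨i, h, hm, hc⟩
    refine ⟨q.drop (i + 1), ?_⟩
    have h1 : q.take (i + 1) = q.take i ++ [q[i]] := by
      rw [List.take_add_one]
      simp [List.getElem?_eq_getElem h]
    calc m ++ [c] ++ q.drop (i + 1)
        = q.take (i + 1) ++ q.drop (i + 1) := by rw [h1, hm, hc]
      _ = q := List.take_append_drop _ _

-- membership in B's ancestor set ↔ m ++ "/" is a prefix of q
theorem pv_mem_ancestors_iff (q m : List Char) :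
    PySem.Set.contains
        (PySem.Set.ofList ((q.zipIdx.filter (fun p => p.1 == '/')).map (fun p => q.take p.2))) m = true
      ↔ PySem.Chars.startswith q (m ++ ['/']) = true := by
  rw [PySem.Chars.startswith_iff, pv_prefix_snoc_iff]
  simp only [PySem.Set.contains, List.contains_iff_mem, PySem.Set.mem_ofList, List.mem_map,
    List.mem_filter, beq_iff_eq]
  constructor
  · rintro ⟨⟨c, i⟩, ⟨hmem, hc⟩, htake⟩
    have hgi := List.mk_mem_zipIdx_iff_getElem?.mp hmem
    have hlt : i < q.length := by
      by_contra hn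
      rw [List.getElem?_eq_none (by omega)] at hgi
      cases hgi
    have hci : q[i] = c := by
      rw [List.getElem?_eq_getElem hlt] at hgi
      exact Option.some.inj hgi
    have hc' : c = '/' := hc
    have ht' : q.take i = m := htake
    exact ⟨i, hlt, ht', by rw [hci, hc']⟩
  · rintro ⟨i, hlt, htake, hc⟩
    exact ⟨(q[i], i), ⟨List.mk_mem_zipIdx_iff_getElem?.mpr (List.getElem?_eq_getElem hlt), hc⟩, htake⟩

-- ===== VERDICT (by name: the statement is the Claim_ definition above) =====
theorem is_mounted_py_spec : Claim_equal_is_mounted_py := by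
  intro path ams _
  unfold Spec_is_mounted_py is_mounted_py is_mounted_py_alt
  simp only [pvNormB_eq]
  apply Bool.coe_iff_coe.mp
  simp only [List.any_eq_true, Bool.or_eq_true, beq_iff_eq]
  constructor
  · intro h
    split at h
    · rename_i hq
      obtain ⟨mp, hmp, he⟩ := hq
      exact ⟨mp, hmp, Or.inl he⟩
    · obtain ⟨mp, hmp, hs⟩ := List.any_eq_true.mp h
      exact ⟨mp, hmp, Or.inr ((pv_mem_ancestors_iff _ _).mpr hs)⟩
  · rintro ⟨mp, hmp, hcase⟩
    rcases hcase with he | hin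
    · rw [if_pos ⟨mp, hmp, he⟩]
    · split
      · rfl
      · exact List.any_eq_true.mpr ⟨mp, hmp, (pv_mem_ancestors_iff _ _).mp hin⟩
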